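-- pv_equiv track=rewrite | github.com/EnisBerk/adventofcode | day10/tools.py | calc_part2_line_score
-- ===== SOURCE A (Python) =====
-- def calc_part2_line_score(completing_chars):
--     '''
--     calculate part 2 score
--     '''
--     score_per_char = {
--         ')': 1,
--         '}': 3,
--         ']': 2,
--         '>': 4,
--     }
--     total_score = 0
--     for char in completing_chars:
--         total_score *= 5
--         total_score += score_per_char[char]
--
--     return total_score
-- ===== SOURCE B (Python) =====
-- def calc_part2_line_score(completing_chars):
--     '''
--     calculate part 2 score (positional weighted sum instead of Horner accumulator)
--     '''
--     score_per_char = {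
--         ')': 1,
--         '}': 3,
--         ']': 2,
--         '>': 4,
--     }
--     return sum(score_per_char[c] * 5 ** i
--                for i, c in enumerate(reversed(list(completing_chars))))
-- ===== Notes on version B (the rewrite author's own statement) =====
-- stated objective: alternative
-- what changed: Replaced the Horner-style running multiply-add accumulator loop with a materialized positional weighted sum: each char's score times 5**i over the reversed sequence.
import Mathlib
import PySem

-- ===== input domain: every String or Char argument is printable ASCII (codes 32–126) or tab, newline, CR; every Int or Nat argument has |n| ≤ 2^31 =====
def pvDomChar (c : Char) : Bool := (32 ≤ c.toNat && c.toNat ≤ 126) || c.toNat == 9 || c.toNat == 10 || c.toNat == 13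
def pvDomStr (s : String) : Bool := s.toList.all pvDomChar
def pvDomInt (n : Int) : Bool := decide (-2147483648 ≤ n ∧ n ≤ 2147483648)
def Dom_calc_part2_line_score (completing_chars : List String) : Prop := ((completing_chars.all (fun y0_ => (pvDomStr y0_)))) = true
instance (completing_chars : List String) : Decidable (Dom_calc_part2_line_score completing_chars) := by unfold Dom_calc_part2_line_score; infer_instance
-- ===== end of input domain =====

-- B replaces A's Horner-style accumulator loop with a positional weighted sum over the
-- reversed list (alternative decomposition, same cost).

-- ===== PORT A =====
def pvScorePerChar : PySem.Dict String Int :=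
  PySem.Dict.ofList [(")", 1), ("}", 3), ("]", 2), (">", 4)]

-- 'score_per_char[char]' raises KeyError outside the four keys; Pre_ excludes exactly
-- those inputs, so the default 0 of getD is never reached inside Pre_.
def calc_part2_line_score (completing_chars : List String) : Int :=
  completing_chars.foldl (fun total_score char => total_score * 5 + (pvScorePerChar.get? char).getD 0) 0

-- ===== PORT B =====
-- '5 ** i' with i = enumerate index ≥ 0: exact as 5 ^ i.toNat.
def calc_part2_line_score_alt (completing_chars : List String) : Int :=
  ((PySem.List.enumerate completing_chars.reverse 0).map
      (fun p => (pvScorePerChar.get? p.2).getD 0 * (5 : Int) ^ p.1.toNat)).sum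

-- ===== PRECONDITION & SPEC =====
-- Pre_ excludes inputs on which A raises KeyError (an element other than the four closers).
def Pre_calc_part2_line_score (completing_chars : List String) : Prop :=
  ∀ c ∈ completing_chars, c = ")" ∨ c = "}" ∨ c = "]" ∨ c = ">"
instance (completing_chars : List String) : Decidable (Pre_calc_part2_line_score completing_chars) := by
  unfold Pre_calc_part2_line_score; infer_instance
def pvWitness_calc_part2_line_score : List String := ["]", ")", "}", ">"]

def Spec_calc_part2_line_score (completing_chars : List String) (out : Int) : Prop := out = calc_part2_line_score_alt completing_chars
instance (completing_chars : List String) (out : Int) : Decidable (Spec_calc_part2_line_score completing_chars out) := by unfold Spec_calc_part2_line_score; infer_instance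

-- ===== CLAIM (what is proved, stated in full; the proofs are below) =====
def Claim_equal_calc_part2_line_score : Prop := ∀ (completing_chars : List String), Dom_calc_part2_line_score completing_chars → Pre_calc_part2_line_score completing_chars → Spec_calc_part2_line_score completing_chars (calc_part2_line_score completing_chars)

-- ===== LEMMAS AND PROOFS =====

-- f is the per-char score both ports use
def pvF (c : String) : Int := (pvScorePerChar.get? c).getD 0

-- A's Horner fold from an arbitrary accumulator, as accumulator times 5^len plus the sum.
theorem pvHorner (cs : List String) : ∀ (acc : Int),
    cs.foldl (fun t c => t * 5 + pvF c) acc =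
      acc * 5 ^ cs.length +
        ((PySem.List.enumerate cs.reverse 0).map (fun p => pvF p.2 * (5 : Int) ^ p.1.toNat)).sum := by
  induction cs with
  | nil => intro acc; simp [PySem.List.enumerate_nil]
  | cons c cs ih =>
    intro acc
    simp only [List.foldl_cons, ih, List.reverse_cons, PySem.List.enumerate_append,
      List.map_append, List.sum_append, List.length_cons, List.length_reverse,
      PySem.List.enumerate_cons, PySem.List.enumerate_nil, List.map_cons, List.map_nil,
      List.sum_cons, List.sum_nil]
    have h0 : (0 + (cs.length : Int)).toNat = cs.length := by omega
    rw [h0]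
    ring

-- ===== VERDICT (by name: the statement is the Claim_ definition above) =====
theorem calc_part2_line_score_spec : Claim_equal_calc_part2_line_score := by
  intro cs _ _
  unfold Spec_calc_part2_line_score calc_part2_line_score calc_part2_line_score_alt
  have := pvHorner cs 0
  simpa [pvF] using this
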